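-- pv_equiv track=rewrite | github.com/DanMG20/Cursos_python | codewars_training/Ejercicios/Hackerrank/hackerrank2.py | contandoValles
-- ===== SOURCE A (Python) =====
-- def contandoValles(pasos, camino):
-- # si el paso cambia  de D = cuesta abajo, a U = cuesta arriba entonces lugar =  Valle
-- # si el paso cambia de U = cuesta arriba, a D = cuesta abajo entonces lugar = montaña
--     valles = 0
--     nivel = 0  # (nivel del mar)
--
--     for paso in camino:
--         if paso == "U":
--             nivel +=1
--             if nivel == 0:
--                 valles +=1
--         else:
--             nivel -=1
--     return valles
-- ===== SOURCE B (Python) =====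
-- from itertools import accumulate
--
-- def contandoValles(pasos, camino):
--     steps = [1 if c == "U" else -1 for c in camino]
--     levels = list(accumulate(steps))
--     return sum(1 for c, lvl in zip(camino, levels) if c == "U" and lvl == 0)
-- ===== Notes on version B (the rewrite author's own statement) =====
-- stated objective: alternative
-- what changed: Replaced the single interleaved state-tracking loop by two phases: map steps to +1/-1 and materialize the full prefix-sum level table with itertools.accumulate, then count positions where an 'U' step lands at level 0.
import Mathlib
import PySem

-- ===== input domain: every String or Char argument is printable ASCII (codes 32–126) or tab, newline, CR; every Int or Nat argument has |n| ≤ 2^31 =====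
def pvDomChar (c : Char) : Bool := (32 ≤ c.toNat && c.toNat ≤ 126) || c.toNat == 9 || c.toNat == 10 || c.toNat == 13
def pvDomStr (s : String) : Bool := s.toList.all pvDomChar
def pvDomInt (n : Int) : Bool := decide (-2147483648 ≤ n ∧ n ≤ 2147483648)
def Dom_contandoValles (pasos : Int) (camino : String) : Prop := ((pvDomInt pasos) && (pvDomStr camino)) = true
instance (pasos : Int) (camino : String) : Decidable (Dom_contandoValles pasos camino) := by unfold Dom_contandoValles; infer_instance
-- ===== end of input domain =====

-- B separates the computation into a materialized prefix-sum level table plus a counting pass (alternative decomposition; same O(n) cost).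

-- ===== PORT A =====
-- the for-loop over camino with state (valles, nivel)
def pvALoop : List Char → Int → Int → Int
  | [], valles, _ => valles
  | c :: cs, valles, nivel =>
    if c = 'U' then
      if nivel + 1 = 0 then pvALoop cs (valles + 1) (nivel + 1)
      else pvALoop cs valles (nivel + 1)
    else pvALoop cs valles (nivel - 1)

def contandoValles (pasos : Int) (camino : String) : Int :=
  pvALoop camino.toList 0 0

-- ===== PORT B =====
-- itertools.accumulate: running-sum prefix table starting from s
def pvAccumulate : List Int → Int → List Int
  | [], _ => []
  | x :: xs, s => (s + x) :: pvAccumulate xs (s + x)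

def contandoValles_alt (pasos : Int) (camino : String) : Int :=
  let steps := camino.toList.map (fun c => if c = 'U' then (1 : Int) else -1)
  let levels := pvAccumulate steps 0
  (((camino.toList.zip levels).filter (fun p => p.1 == 'U' && p.2 == 0)).length : Int)

-- ===== PRECONDITION & SPEC =====
def Spec_contandoValles (pasos : Int) (camino : String) (out : Int) : Prop := out = contandoValles_alt pasos camino
instance (pasos : Int) (camino : String) (out : Int) : Decidable (Spec_contandoValles pasos camino out) := by unfold Spec_contandoValles; infer_instance

-- ===== CLAIM (what is proved, stated in full; the proofs are below) =====
def Claim_equal_contandoValles : Prop := ∀ (pasos : Int) (camino : String), Dom_contandoValles pasos camino → Spec_contandoValles pasos camino (contandoValles pasos camino)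

-- ===== LEMMAS AND PROOFS =====

theorem pvALoop_eq (cs : List Char) : ∀ (valles nivel : Int),
    pvALoop cs valles nivel =
      valles + (((cs.zip (pvAccumulate (cs.map (fun c => if c = 'U' then (1 : Int) else -1)) nivel)).filter
        (fun p => p.1 == 'U' && p.2 == 0)).length : Int) := by
  induction cs with
  | nil => intro valles nivel; simp [pvALoop, pvAccumulate]
  | cons c cs ih =>
    intro valles nivel
    simp only [pvALoop, List.map_cons, pvAccumulate, List.zip_cons_cons, List.filter_cons]
    by_cases hc : c = 'U'
    · subst hc
      by_cases hn : nivel + 1 = 0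
      · simp [hn, ih, List.length_cons]
        push_cast
        ring
      · simp [hn, ih]
    · have hb : (c == 'U') = false := by simp [hc]
      have h1 : (if c = 'U' then (1:Int) else -1) = -1 := by simp [hc]
      simp [hc, hb, h1, ih]
      ring_nf

theorem contandoValles_spec : Claim_equal_contandoValles := by
  intro pasos camino _
  unfold Spec_contandoValles contandoValles contandoValles_alt
  simpa using pvALoop_eq camino.toList 0 0
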